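-- pv_equiv track=rewrite | github.com/gongzhaopeng/solutions.questions.algoexpert.io | Medium/SweetAndSavory_Medium/SolutionII_SweetAndSavory_Medium.py | sweetAndSavory
-- ===== SOURCE A (Python) =====
-- from bisect import bisect_left, bisect_right
--
-- def sweetAndSavory(dishes, target):
--     paring, min_diff = [0, 0], float('inf')
--     dishes.sort()
--     sweet_pos = bisect_left(dishes, 0) - 1
--     savory_pos = sweet_pos + 1
--     while sweet_pos >= 0 and savory_pos < len(dishes):
--         sweet, savory = dishes[sweet_pos], dishes[savory_pos]
--         diff = target - (sweet + savory)
--         if diff < 0: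
--             sweet_pos -= 1
--         elif diff > 0:
--             if diff < min_diff:
--                 paring, min_diff = [sweet, savory], diff
--             savory_pos += 1
--         else:
--             paring = [sweet, savory]
--             break
--     return paring
-- ===== SOURCE B (Python) =====
-- from bisect import bisect_left, bisect_right
--
-- def sweetAndSavory(dishes, target):
--     # Per-sweet binary-search lookup instead of the two-pointer walk.
--     # Like A, sorts `dishes` in place (same observable mutation).
--     dishes.sort()
--     p = bisect_left(dishes, 0)
--     sweets, savory = dishes[:p], dishes[p:]
--     paring, min_diff = [0, 0], float('inf')
--     for sweet in reversed(sweets):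
--         j = bisect_right(savory, target - sweet) - 1
--         if j >= 0:
--             diff = target - (sweet + savory[j])
--             if diff < min_diff:
--                 paring, min_diff = [sweet, savory[j]], diff
--     return paring
-- ===== Notes on version B (the rewrite author's own statement) =====
-- stated objective: alternative
-- what changed: Replaces A's interleaved two-pointer walk over the sorted list with a split into sweets/savory halves and one bisect_right binary-search lookup per sweet (iterated from the sweet closest to zero downward, strict-improvement updates), proved to give the identical pair including tie-breaks.
import Mathlib
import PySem

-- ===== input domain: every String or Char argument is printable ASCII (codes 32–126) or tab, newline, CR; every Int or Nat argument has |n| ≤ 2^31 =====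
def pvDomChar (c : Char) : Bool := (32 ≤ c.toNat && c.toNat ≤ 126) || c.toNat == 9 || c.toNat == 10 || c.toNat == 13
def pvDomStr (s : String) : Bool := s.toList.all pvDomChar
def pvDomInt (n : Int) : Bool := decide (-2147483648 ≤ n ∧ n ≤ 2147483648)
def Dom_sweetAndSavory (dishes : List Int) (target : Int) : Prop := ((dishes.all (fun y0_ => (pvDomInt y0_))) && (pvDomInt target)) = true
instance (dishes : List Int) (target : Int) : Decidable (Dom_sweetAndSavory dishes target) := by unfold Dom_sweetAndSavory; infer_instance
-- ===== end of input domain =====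

-- B replaces A's two-pointer walk by one binary-search (bisect_right) lookup per sweet dish;
-- both Pythons sort `dishes` in place (same observable mutation), the equivalence is about the return value.

-- shared helper: Python's `diff < min_diff` where min_diff starts as float('inf'); none = inf
def ltInf (d : Int) (md : Option Int) : Bool :=
  match md with
  | none => true
  | some m => decide (d < m)

-- ===== PORT A =====
-- the while loop of A; i = sweet_pos (may reach -1), j = savory_pos; indices are in range
-- whenever read, so List.getD is exact for Python's dishes[i]/dishes[j]
def aLoop (L : List Int) (t : Int) (i : Int) (j : Nat) (par : List Int) (md : Option Int) : List Int :=
  if h : 0 ≤ i ∧ j < L.length then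
    if t - (L.getD i.toNat 0 + L.getD j 0) < 0 then
      aLoop L t (i - 1) j par md
    else if 0 < t - (L.getD i.toNat 0 + L.getD j 0) then
      if ltInf (t - (L.getD i.toNat 0 + L.getD j 0)) md then
        aLoop L t i (j + 1) [L.getD i.toNat 0, L.getD j 0] (some (t - (L.getD i.toNat 0 + L.getD j 0)))
      else
        aLoop L t i (j + 1) par md
    else
      [L.getD i.toNat 0, L.getD j 0]
  else par
termination_by ((i + 1).toNat + (L.length - j))
decreasing_by all_goals omega

def sweetAndSavory (dishes : List Int) (target : Int) : List Int :=
  aLoop (PySem.List.sorted dishes (fun x => x)) target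
    ((PySem.List.bisectLeft (PySem.List.sorted dishes (fun x => x)) 0 : Int) - 1)
    (PySem.List.bisectLeft (PySem.List.sorted dishes (fun x => x)) 0)
    [0, 0] none

-- ===== PORT B =====
-- one iteration of B's for-loop: binary search the largest savory ≤ target - sweet
def bStep (savory : List Int) (t : Int) (acc : List Int × Option Int) (sweet : Int) : List Int × Option Int :=
  if 0 ≤ (PySem.List.bisectRight savory (t - sweet) : Int) - 1 then
    if ltInf (t - (sweet + savory.getD ((PySem.List.bisectRight savory (t - sweet) : Int) - 1).toNat 0)) acc.2 then
      ([sweet, savory.getD ((PySem.List.bisectRight savory (t - sweet) : Int) - 1).toNat 0],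
        some (t - (sweet + savory.getD ((PySem.List.bisectRight savory (t - sweet) : Int) - 1).toNat 0)))
    else acc
  else acc

def sweetAndSavory_alt (dishes : List Int) (target : Int) : List Int :=
  (((PySem.List.sorted dishes (fun x => x)).take
      (PySem.List.bisectLeft (PySem.List.sorted dishes (fun x => x)) 0)).reverse.foldl
    (fun acc s =>
      bStep ((PySem.List.sorted dishes (fun x => x)).drop
        (PySem.List.bisectLeft (PySem.List.sorted dishes (fun x => x)) 0)) target acc s)
    ([0, 0], none)).1

-- ===== PRECONDITION & SPEC =====
def Spec_sweetAndSavory (dishes : List Int) (target : Int) (out : List Int) : Prop := out = sweetAndSavory_alt dishes target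
instance (dishes : List Int) (target : Int) (out : List Int) : Decidable (Spec_sweetAndSavory dishes target out) := by unfold Spec_sweetAndSavory; infer_instance

-- ===== CLAIM (what is proved, stated in full; the proofs are below) =====
def Claim_equal_sweetAndSavory : Prop := ∀ (dishes : List Int) (target : Int), Dom_sweetAndSavory dishes target → Spec_sweetAndSavory dishes target (sweetAndSavory dishes target)

-- ===== LEMMAS AND PROOFS =====

lemma getD_mono (L : List Int) (hs : L.Pairwise (· ≤ ·)) (k k' : Nat) (hk : k ≤ k')
    (hk' : k' < L.length) : L.getD k 0 ≤ L.getD k' 0 := by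
  rcases Nat.eq_or_lt_of_le hk with rfl | h
  · exact le_refl _
  · rw [List.getD_eq_getElem _ _ (lt_of_le_of_lt hk hk'), List.getD_eq_getElem _ _ hk']
    exact List.pairwise_iff_getElem.mp hs k k' (lt_of_le_of_lt hk hk') hk' h

lemma getD_drop (L : List Int) (p q : Nat) (h : p + q < L.length) :
    (L.drop p).getD q 0 = L.getD (p + q) 0 := by
  have hq : q < (L.drop p).length := by simp [List.length_drop]; omega
  rw [List.getD_eq_getElem _ _ hq, List.getD_eq_getElem _ _ h]
  simp [List.getElem_drop]

-- getD form of PySem.List.bisectRight_spec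
lemma brFacts (sv : List Int) (x : Int) (hs : sv.Pairwise (· ≤ ·)) :
    PySem.List.bisectRight sv x ≤ sv.length ∧
    (∀ k, k < PySem.List.bisectRight sv x → k < sv.length → sv.getD k 0 ≤ x) ∧
    (∀ k, PySem.List.bisectRight sv x ≤ k → k < sv.length → x < sv.getD k 0) := by
  obtain ⟨h1, h2, h3⟩ := PySem.List.bisectRight_spec sv x hs
  refine ⟨h1, ?_, ?_⟩
  · intro k hk hk'; rw [List.getD_eq_getElem _ _ hk']; exact h2 k hk' hk
  · intro k hk hk'; rw [List.getD_eq_getElem _ _ hk']; exact h3 k hk' hk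

lemma brPin (sv : List Int) (x : Int) (hs : sv.Pairwise (· ≤ ·)) (m : Nat) (hm : m ≤ sv.length)
    (h1 : ∀ k, k < m → sv.getD k 0 ≤ x) (h2 : m < sv.length → x < sv.getD m 0) :
    PySem.List.bisectRight sv x = m := by
  obtain ⟨hc1, hc2, hc3⟩ := brFacts sv x hs
  by_contra hne
  rcases Nat.lt_or_ge (PySem.List.bisectRight sv x) m with h | h
  · have := hc3 _ (le_refl _) (lt_of_lt_of_le h hm)
    have := h1 _ h
    omega
  · have hm' : m < PySem.List.bisectRight sv x := by omega
    have hlen : m < sv.length := lt_of_lt_of_le hm' hc1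
    have := hc2 m hm' hlen
    have := h2 hlen
    omega

lemma foldr_fix (sv : List Int) (t : Int) (sw : List Int) (acc : List Int × Option Int)
    (h : ∀ s ∈ sw, bStep sv t acc s = acc) :
    sw.foldr (fun s a => bStep sv t a s) acc = acc := by
  induction sw with
  | nil => rfl
  | cons s sw ih =>
      simp only [List.foldr_cons]
      rw [ih (fun s' hs' => h s' (List.mem_cons_of_mem _ hs'))]
      exact h s (List.mem_cons_self ..)

-- once an exact pair was found (min_diff = 0) no later step changes the accumulator
lemma bStep_zero (sv : List Int) (t : Int) (pr : List Int) (s : Int)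
    (hs : sv.Pairwise (· ≤ ·)) : bStep sv t (pr, some 0) s = (pr, some 0) := by
  unfold bStep
  obtain ⟨hc1, hc2, hc3⟩ := brFacts sv (t - s) hs
  split
  · next hge =>
      have hlt : ((PySem.List.bisectRight sv (t - s) : Int) - 1).toNat
          < PySem.List.bisectRight sv (t - s) := by omega
      have hle := hc2 _ hlt (by omega)
      simp only [ltInf]
      rw [if_neg]
      simp only [decide_eq_true_eq]
      omega
  · rfl

lemma take_succ_getD (L : List Int) (n : Nat) (h : n < L.length) :
    L.take (n + 1) = L.take n ++ [L.getD n 0] := by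
  rw [List.take_add_one, List.getD_eq_getElem _ _ h, List.getElem?_eq_getElem h]
  rfl

lemma mem_take_le (L : List Int) (hs : L.Pairwise (· ≤ ·)) (m : Nat) (hm : m ≤ L.length)
    (h0 : 1 ≤ m) : ∀ s ∈ L.take m, s ≤ L.getD (m - 1) 0 := by
  intro s hsm
  obtain ⟨k, hk, hks⟩ := List.mem_iff_getElem.mp hsm
  have hk' : k < m := by simpa [List.length_take] using (by simpa [List.length_take] using hk : k < min m L.length).trans_le (min_le_left _ _)
  have hkl : k < L.length := lt_of_lt_of_le hk' hm
  have : (L.take m)[k] = L[k] := List.getElem_take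
  rw [← hks, this, ← List.getD_eq_getElem _ 0 hkl]
  exact getD_mono L hs k (m - 1) (by omega) (by omega)

-- main simulation: A's two-pointer loop equals B's fold over the remaining sweets
lemma sim (L : List Int) (t : Int) (p : Nat) (hs : L.Pairwise (· ≤ ·)) (hp : p ≤ L.length) :
    ∀ (n : Nat) (i : Int) (j : Nat) (par : List Int) (md : Option Int),
      (i + 1).toNat + (L.length - j) ≤ n →
      i < (p : Int) → p ≤ j → j ≤ L.length →
      (∀ k, p ≤ k → k < j → 0 ≤ i → L.getD k 0 < t - L.getD i.toNat 0) →
      (p < j → 0 ≤ i → ∃ m, md = some m ∧ m ≤ t - L.getD i.toNat 0 - L.getD (j - 1) 0) →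
      (∀ m, md = some m → 0 < m) →
      aLoop L t i j par md
        = (((L.take p).take (i + 1).toNat).foldr
            (fun s a => bStep (L.drop p) t a s) (par, md)).1 := by
  intro n
  induction n with
  | zero =>
      intro i j par md hn hi hj hjl invA invC invD
      rw [aLoop.eq_def, dif_neg (by omega : ¬ (0 ≤ i ∧ j < L.length))]
      have h1 : (i + 1).toNat = 0 := by omega
      rw [h1]
      simp
  | succ n ih =>
      intro i j par md hn hi hj hjl invA invC invD
      have hsvp : (L.drop p).Pairwise (· ≤ ·) := hs.sublist (List.drop_sublist ..)
      have hsvl : (L.drop p).length = L.length - p := by simp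
      by_cases h0 : 0 ≤ i ∧ j < L.length
      · obtain ⟨hi0, hjlen⟩ := h0
        have hnip : i.toNat < p := by omega
        have hnil : i.toNat < L.length := by omega
        have htake : (L.take p).take (i + 1).toNat = L.take i.toNat ++ [L.getD i.toNat 0] := by
          rw [List.take_take]
          have h2 : min (i + 1).toNat p = i.toNat + 1 := by clear invA invC invD; omega
          rw [h2, take_succ_getD L i.toNat hnil]
        rw [aLoop.eq_def, dif_pos ⟨hi0, hjlen⟩, htake, List.foldr_append]
        simp only [List.foldr_cons, List.foldr_nil]
        by_cases hd : t - (L.getD i.toNat 0 + L.getD j 0) < 0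
        · -- diff < 0 : A moves the sweet pointer; B's step at this sweet does not update
          rw [if_pos hd]
          have hstep : bStep (L.drop p) t (par, md) (L.getD i.toNat 0) = (par, md) := by
            have hbr : PySem.List.bisectRight (L.drop p) (t - L.getD i.toNat 0) = j - p := by
              apply brPin _ _ hsvp
              · omega
              · intro k hk
                rw [getD_drop L p k (by omega)]
                have h5 := invA (p + k) (by omega) (by omega) hi0
                omega
              · intro hcon
                rw [getD_drop L p (j - p) (by omega)]
                have hx : p + (j - p) = j := by omega
                rw [hx]
                omega
            unfold bStep
            rw [hbr]
            by_cases hjp : p = j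
            · rw [if_neg (by clear invA invC invD; omega)]
            · obtain ⟨m, hmd, hm⟩ := invC (by omega) hi0
              rw [if_pos (by clear invA invC invD; omega)]
              have htn : (((j - p : Nat) : Int) - 1).toNat = j - p - 1 := by
                clear invA invC invD; omega
              rw [htn, getD_drop L p (j - p - 1) (by omega)]
              have hidx : p + (j - p - 1) = j - 1 := by omega
              rw [hidx, hmd]
              simp only [ltInf]
              rw [if_neg]
              simp only [decide_eq_true_eq]
              omega
          rw [hstep]
          have hmono := getD_mono L hs (i - 1).toNat i.toNat (by clear invA invC invD; omega) hnil
          have hA' : ∀ k, p ≤ k → k < j → 0 ≤ i - 1 →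
              L.getD k 0 < t - L.getD (i - 1).toNat 0 := by
            intro k hk1 hk2 _
            have h6 := invA k hk1 hk2 hi0
            omega
          have hC' : p < j → 0 ≤ i - 1 →
              ∃ m, md = some m ∧ m ≤ t - L.getD (i - 1).toNat 0 - L.getD (j - 1) 0 := by
            intro hpj _
            obtain ⟨m, hmd, hm⟩ := invC hpj hi0
            exact ⟨m, hmd, by omega⟩
          rw [ih (i - 1) j par md (by clear invA invC invD hA' hC'; omega) (by omega) hj hjl hA' hC' invD]
          have htk2 : (L.take p).take ((i - 1) + 1).toNat = L.take i.toNat := by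
            rw [List.take_take]
            congr 1
            clear invA invC invD hA' hC'
            omega
          rw [htk2]
        · rw [if_neg hd]
          by_cases hd2 : 0 < t - (L.getD i.toNat 0 + L.getD j 0)
          · -- diff > 0 : A advances the savory pointer, possibly recording; the B step absorbs it
            rw [if_pos hd2]
            obtain ⟨hc1, hc2, hc3⟩ := brFacts (L.drop p) (t - L.getD i.toNat 0) hsvp
            have hcgt : j - p < PySem.List.bisectRight (L.drop p) (t - L.getD i.toNat 0) := by
              by_contra hcon
              have h7 := hc3 (j - p) (by omega) (by omega)
              rw [getD_drop L p (j - p) (by omega)] at h7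
              have hx : p + (j - p) = j := by omega
              rw [hx] at h7
              omega
            have hcand_le := hc2 (PySem.List.bisectRight (L.drop p) (t - L.getD i.toNat 0) - 1)
              (by omega) (by omega)
            have hcand_ge : L.getD j 0 ≤
                (L.drop p).getD (PySem.List.bisectRight (L.drop p) (t - L.getD i.toNat 0) - 1) 0 := by
              have h8 := getD_mono (L.drop p) hsvp (j - p)
                (PySem.List.bisectRight (L.drop p) (t - L.getD i.toNat 0) - 1) (by omega) (by omega)
              rw [getD_drop L p (j - p) (by omega)] at h8
              have hx : p + (j - p) = j := by omega
              rw [hx] at h8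
              exact h8
            have hA' : ∀ k, p ≤ k → k < j + 1 → 0 ≤ i →
                L.getD k 0 < t - L.getD i.toNat 0 := by
              intro k hk1 hk2 _
              by_cases hkj : k = j
              · subst hkj; omega
              · exact invA k hk1 (by omega) hi0
            have htn : ((PySem.List.bisectRight (L.drop p) (t - L.getD i.toNat 0) : Int) - 1).toNat
                = PySem.List.bisectRight (L.drop p) (t - L.getD i.toNat 0) - 1 := by
              clear invA invC invD hA'; omega
            by_cases hlt : ltInf (t - (L.getD i.toNat 0 + L.getD j 0)) md = true
            · rw [if_pos hlt]
              have hC' : p < j + 1 → 0 ≤ i →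
                  ∃ m', some (t - (L.getD i.toNat 0 + L.getD j 0)) = some m' ∧
                    m' ≤ t - L.getD i.toNat 0 - L.getD (j + 1 - 1) 0 := by
                intro _ _
                refine ⟨t - (L.getD i.toNat 0 + L.getD j 0), rfl, ?_⟩
                rw [Nat.add_sub_cancel]
                omega
              have hD' : ∀ m', some (t - (L.getD i.toNat 0 + L.getD j 0)) = some m' → 0 < m' := by
                intro m' hm'
                have h9 := Option.some.inj hm'
                omega
              rw [ih i (j + 1) [L.getD i.toNat 0, L.getD j 0]
                (some (t - (L.getD i.toNat 0 + L.getD j 0)))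
                (by clear invA invC invD hA' hC' hD'; omega) hi (by omega) (by omega) hA' hC' hD']
              rw [htake, List.foldr_append]
              simp only [List.foldr_cons, List.foldr_nil]
              have hseed : bStep (L.drop p) t ([L.getD i.toNat 0, L.getD j 0],
                    some (t - (L.getD i.toNat 0 + L.getD j 0))) (L.getD i.toNat 0)
                  = bStep (L.drop p) t (par, md) (L.getD i.toNat 0) := by
                unfold bStep
                rw [if_pos (by clear invA invC invD hA'; omega), htn]
                have hrlt : ltInf (t - (L.getD i.toNat 0 +
                    (L.drop p).getD (PySem.List.bisectRight (L.drop p) (t - L.getD i.toNat 0) - 1) 0))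
                    md = true := by
                  cases md with
                  | none => rfl
                  | some m =>
                      simp only [ltInf, decide_eq_true_eq] at hlt ⊢
                      omega
                rw [if_pos hrlt]
                by_cases hq : t - (L.getD i.toNat 0 +
                    (L.drop p).getD (PySem.List.bisectRight (L.drop p) (t - L.getD i.toNat 0) - 1) 0)
                    < t - (L.getD i.toNat 0 + L.getD j 0)
                · rw [if_pos (by simp only [ltInf, decide_eq_true_eq]; exact hq)]
                  rw [if_pos (by clear invA invC invD hA'; omega : (0:Int) ≤ (PySem.List.bisectRight (L.drop p) (t - L.getD i.toNat 0) : Int) - 1)]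
                · rw [if_neg (by simp only [ltInf, decide_eq_true_eq]; exact hq)]
                  have hceq : (L.drop p).getD
                      (PySem.List.bisectRight (L.drop p) (t - L.getD i.toNat 0) - 1) 0
                      = L.getD j 0 := by omega
                  rw [hceq]
                  rw [if_pos (by clear invA invC invD hA'; omega : (0:Int) ≤ (PySem.List.bisectRight (L.drop p) (t - L.getD i.toNat 0) : Int) - 1)]
              rw [hseed]
            · rw [if_neg hlt]
              have hC' : p < j + 1 → 0 ≤ i →
                  ∃ m, md = some m ∧ m ≤ t - L.getD i.toNat 0 - L.getD (j + 1 - 1) 0 := by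
                intro _ _
                cases md with
                | none => exact absurd rfl hlt
                | some m =>
                    refine ⟨m, rfl, ?_⟩
                    simp only [ltInf, decide_eq_true_eq] at hlt
                    rw [Nat.add_sub_cancel]
                    omega
              rw [ih i (j + 1) par md
                (by clear invA invC invD hA' hC'; omega) hi (by omega) (by omega) hA' hC' invD]
              rw [htake, List.foldr_append]
              simp only [List.foldr_cons, List.foldr_nil]
          · -- diff = 0 : exact pair; both return it
            rw [if_neg hd2]
            obtain ⟨hc1, hc2, hc3⟩ := brFacts (L.drop p) (t - L.getD i.toNat 0) hsvp
            have hcgt : j - p < PySem.List.bisectRight (L.drop p) (t - L.getD i.toNat 0) := by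
              by_contra hcon
              have h7 := hc3 (j - p) (by omega) (by omega)
              rw [getD_drop L p (j - p) (by omega)] at h7
              have hx : p + (j - p) = j := by omega
              rw [hx] at h7
              omega
            have hcand_le := hc2 (PySem.List.bisectRight (L.drop p) (t - L.getD i.toNat 0) - 1)
              (by omega) (by omega)
            have hcand_ge : L.getD j 0 ≤
                (L.drop p).getD (PySem.List.bisectRight (L.drop p) (t - L.getD i.toNat 0) - 1) 0 := by
              have h8 := getD_mono (L.drop p) hsvp (j - p)
                (PySem.List.bisectRight (L.drop p) (t - L.getD i.toNat 0) - 1) (by omega) (by omega)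
              rw [getD_drop L p (j - p) (by omega)] at h8
              have hx : p + (j - p) = j := by omega
              rw [hx] at h8
              exact h8
            have hstep : bStep (L.drop p) t (par, md) (L.getD i.toNat 0)
                = ([L.getD i.toNat 0, L.getD j 0], some 0) := by
              unfold bStep
              rw [if_pos (by clear invA invC invD; omega)]
              have htn : ((PySem.List.bisectRight (L.drop p) (t - L.getD i.toNat 0) : Int) - 1).toNat
                  = PySem.List.bisectRight (L.drop p) (t - L.getD i.toNat 0) - 1 := by
                clear invA invC invD; omega
              rw [htn]
              have hcand : (L.drop p).getD
                  (PySem.List.bisectRight (L.drop p) (t - L.getD i.toNat 0) - 1) 0 = L.getD j 0 := by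
                omega
              rw [hcand]
              have hlt : ltInf (t - (L.getD i.toNat 0 + L.getD j 0)) md = true := by
                cases md with
                | none => rfl
                | some m =>
                    have h9 := invD m rfl
                    simp only [ltInf, decide_eq_true_eq]
                    omega
              rw [if_pos hlt]
              have hz : t - (L.getD i.toNat 0 + L.getD j 0) = 0 := by omega
              rw [hz]
            rw [hstep, foldr_fix _ _ _ _
              (fun x _ => bStep_zero (L.drop p) t [L.getD i.toNat 0, L.getD j 0] x hsvp)]
      · rw [aLoop.eq_def, dif_neg h0]
        by_cases hineg : i < 0
        · have h1 : (i + 1).toNat = 0 := by clear invA invC invD; omega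
          rw [h1]
          simp
        · -- savory exhausted: all remaining B steps leave the accumulator unchanged
          have hi0 : 0 ≤ i := by omega
          have hjlen : j = L.length := by omega
          have hnip : i.toNat < p := by omega
          have htk : (L.take p).take (i + 1).toNat = L.take (i + 1).toNat := by
            rw [List.take_take]
            congr 1
            clear invA invC invD
            omega
          have hfix : ∀ x ∈ L.take (i + 1).toNat, bStep (L.drop p) t (par, md) x = (par, md) := by
            intro x hx
            have hxle : x ≤ L.getD i.toNat 0 := by
              have h3 := mem_take_le L hs (i + 1).toNat (by clear invA invC invD; omega) (by clear invA invC invD; omega) x hx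
              have he : (i + 1).toNat - 1 = i.toNat := by clear invA invC invD; omega
              rwa [he] at h3
            unfold bStep
            by_cases hpl : p = L.length
            · have hc0 : PySem.List.bisectRight (L.drop p) (t - x) = 0 := by
                have h4 := (brFacts (L.drop p) (t - x) hsvp).1
                omega
              rw [hc0, if_neg (by norm_num)]
            · have hpj : p < j := by omega
              obtain ⟨m, hmd, hm⟩ := invC hpj hi0
              have hbr : PySem.List.bisectRight (L.drop p) (t - x) = L.length - p := by
                apply brPin _ _ hsvp
                · omega
                · intro k hk
                  rw [getD_drop L p k (by omega)]
                  have h5 := invA (p + k) (by omega) (by omega) hi0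
                  omega
                · intro hcon
                  exfalso
                  omega
              rw [hbr, if_pos (by clear invA; omega)]
              have htn : (((L.length - p : Nat) : Int) - 1).toNat = L.length - p - 1 := by
                clear invA; omega
              rw [htn, getD_drop L p (L.length - p - 1) (by omega)]
              have hidx : p + (L.length - p - 1) = j - 1 := by clear invA; omega
              rw [hidx, hmd]
              simp only [ltInf]
              rw [if_neg]
              simp only [decide_eq_true_eq]
              omega
          rw [htk, foldr_fix _ _ _ _ hfix]

-- ===== VERDICT (by name: the statement is the Claim_ definition above) =====
theorem sweetAndSavory_spec : Claim_equal_sweetAndSavory := by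
  intro dishes target _
  unfold Spec_sweetAndSavory sweetAndSavory sweetAndSavory_alt
  have hs : (PySem.List.sorted dishes (fun x => x)).Pairwise (· ≤ ·) :=
    PySem.List.sorted_pairwise dishes (fun x => x)
  set L := PySem.List.sorted dishes (fun x => x) with hL
  set p := PySem.List.bisectLeft L 0 with hpdef
  have hp : p ≤ L.length := (PySem.List.bisectLeft_spec L 0 hs).1
  rw [List.foldl_reverse]
  rw [sim L target p hs hp (p + (L.length - p)) ((p : Int) - 1) p [0, 0] none
    (by omega) (by omega) (le_refl _) hp
    (fun k hk1 hk2 _ => absurd hk2 (by omega))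
    (fun h _ => absurd h (by omega))
    (fun m h => by cases h)]
  have h1 : (((p : Int) - 1) + 1).toNat = p := by omega
  rw [h1, List.take_take, min_self]
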